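-- pv_equiv track=rewrite | github.com/davidgringras/iatrobench | scripts/failure_taxonomy.py | cross_tab
-- ===== SOURCE A (Python) =====
-- from collections import Counter
--
-- def cross_tab(records, row_field, row_order):
--     """Build {row_val: {mechanism: count}} counter."""
--     table = {r: Counter() for r in row_order}
--     for rec in records:
--         rv = rec[row_field]
--         mech = rec["omission_mechanism"]
--         if rv in table:
--             table[rv][mech] += 1
--     return table
-- ===== SOURCE B (Python) =====
-- from collections import Counter
--
-- def cross_tab(records, row_field, row_order):
--     """Build {row_val: {mechanism: count}} counter."""
--     return {
--         r: Counter(rec["omission_mechanism"]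
--                    for rec in records if rec[row_field] == r)
--         for r in row_order
--     }
-- ===== Notes on version B (the rewrite author's own statement) =====
-- stated objective: simpler
-- what changed: A streams records once, mutating a pre-built dict of Counters behind a membership guard; B is a single dict comprehension that, for each row key, builds its Counter directly from one filtered scan of the records (per-row scans instead of one guarded mutating pass).
import Mathlib
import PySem

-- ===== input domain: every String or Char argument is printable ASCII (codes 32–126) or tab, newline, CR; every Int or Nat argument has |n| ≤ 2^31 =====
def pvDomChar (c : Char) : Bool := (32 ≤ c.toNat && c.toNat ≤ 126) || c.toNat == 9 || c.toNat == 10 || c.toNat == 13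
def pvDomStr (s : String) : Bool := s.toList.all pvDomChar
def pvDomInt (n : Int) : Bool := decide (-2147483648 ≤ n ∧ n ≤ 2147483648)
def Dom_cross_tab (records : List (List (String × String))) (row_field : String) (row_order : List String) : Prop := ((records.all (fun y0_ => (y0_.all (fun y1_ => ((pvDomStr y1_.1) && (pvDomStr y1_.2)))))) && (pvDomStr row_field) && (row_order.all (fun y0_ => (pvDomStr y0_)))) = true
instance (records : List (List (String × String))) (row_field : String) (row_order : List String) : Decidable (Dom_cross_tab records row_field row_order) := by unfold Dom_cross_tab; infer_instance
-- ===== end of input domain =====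

-- B replaces A's single guarded mutating pass over the records by a per-row dict comprehension
-- (one filtered scan of the records per row key); objective: simpler. Not faster.

-- ===== PORT A =====
def cross_tab (records : List (List (String × String))) (row_field : String) (row_order : List String) : List (String × List (String × Int)) :=
  -- table = {r: Counter() for r in row_order}
  let table : PySem.Dict String (PySem.Dict String Int) :=
    row_order.foldl (fun t r => t.insert r PySem.Dict.empty) PySem.Dict.empty
  -- for rec in records: rv = rec[row_field]; mech = rec["omission_mechanism"]; if rv in table: table[rv][mech] += 1
  let table2 :=
    records.foldl (fun t rec =>
      match (PySem.Dict.mk rec).get? row_field with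
      | none => t        -- KeyError (excluded by Pre_cross_tab)
      | some rv =>
        match (PySem.Dict.mk rec).get? "omission_mechanism" with
        | none => t      -- KeyError (excluded by Pre_cross_tab)
        | some mech =>
          if t.contains rv then
            t.modify rv PySem.Dict.empty (fun c => c.modify mech 0 (· + 1))
          else t) table
  table2.items.map (fun p => (p.1, p.2.items))

-- ===== PORT B =====
def cross_tab_alt (records : List (List (String × String))) (row_field : String) (row_order : List String) : List (String × List (String × Int)) :=
  -- {r: Counter(rec["omission_mechanism"] for rec in records if rec[row_field] == r) for r in row_order}
  (row_order.foldl (fun d r =>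
      d.insert r (PySem.Dict.counter
        ((records.filter (fun rec => (PySem.Dict.mk rec).get? row_field == some r)).filterMap
           (fun rec => (PySem.Dict.mk rec).get? "omission_mechanism"))))
    PySem.Dict.empty).items.map (fun p => (p.1, p.2.items))

-- ===== PRECONDITION & SPEC =====
-- Pre_ excludes exactly the inputs where the Python A raises KeyError: some record lacking
-- row_field or the "omission_mechanism" key.
def Pre_cross_tab (records : List (List (String × String))) (row_field : String) (row_order : List String) : Prop :=
  ∀ rec ∈ records, ((PySem.Dict.mk rec).get? row_field).isSome = true ∧ ((PySem.Dict.mk rec).get? "omission_mechanism").isSome = true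
instance (records : List (List (String × String))) (row_field : String) (row_order : List String) : Decidable (Pre_cross_tab records row_field row_order) := by unfold Pre_cross_tab; infer_instance

def pvWitness_cross_tab : (List (List (String × String))) × String × List String :=
  ([[("f", "a"), ("omission_mechanism", "m")]], "f", ["a", "b"])

def Spec_cross_tab (records : List (List (String × String))) (row_field : String) (row_order : List String) (out : List (String × List (String × Int))) : Prop := out = cross_tab_alt records row_field row_order
instance (records : List (List (String × String))) (row_field : String) (row_order : List String) (out : List (String × List (String × Int))) : Decidable (Spec_cross_tab records row_field row_order out) := by unfold Spec_cross_tab; infer_instance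

-- ===== CLAIM (what is proved, stated in full; the proofs are below) =====
def Claim_equal_cross_tab : Prop := ∀ (records : List (List (String × String))) (row_field : String) (row_order : List String), Dom_cross_tab records row_field row_order → Pre_cross_tab records row_field row_order → Spec_cross_tab records row_field row_order (cross_tab records row_field row_order)

-- ===== LEMMAS AND PROOFS =====

-- A's loop step, A's initial table, and the per-row mechanism list shared with B (proof-only helpers).
def ctStepA (row_field : String) (t : PySem.Dict String (PySem.Dict String Int)) (rec : List (String × String)) : PySem.Dict String (PySem.Dict String Int) :=
  match (PySem.Dict.mk rec).get? row_field with
  | none => t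
  | some rv =>
    match (PySem.Dict.mk rec).get? "omission_mechanism" with
    | none => t
    | some mech =>
      if t.contains rv then
        t.modify rv PySem.Dict.empty (fun c => c.modify mech 0 (· + 1))
      else t

def ctTable0 (row_order : List String) : PySem.Dict String (PySem.Dict String Int) :=
  row_order.foldl (fun t r => t.insert r PySem.Dict.empty) PySem.Dict.empty

def ctMs (records : List (List (String × String))) (row_field : String) (r : String) : List String :=
  (records.filter (fun rec => (PySem.Dict.mk rec).get? row_field == some r)).filterMap
    (fun rec => (PySem.Dict.mk rec).get? "omission_mechanism")

theorem cross_tab_eq (records : List (List (String × String))) (row_field : String) (row_order : List String) :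
    cross_tab records row_field row_order
      = (records.foldl (ctStepA row_field) (ctTable0 row_order)).items.map (fun p => (p.1, p.2.items)) := rfl

theorem cross_tab_alt_eq (records : List (List (String × String))) (row_field : String) (row_order : List String) :
    cross_tab_alt records row_field row_order
      = (row_order.foldl (fun d r => d.insert r (PySem.Dict.counter (ctMs records row_field r))) PySem.Dict.empty).items.map
          (fun p => (p.1, p.2.items)) := rfl

theorem ctStepA_keys (row_field : String) (t : PySem.Dict String (PySem.Dict String Int)) (rec : List (String × String)) :
    (ctStepA row_field t rec).keys = t.keys := by
  unfold ctStepA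
  cases h1 : (PySem.Dict.mk rec).get? row_field with
  | none => rfl
  | some rv =>
    cases h2 : (PySem.Dict.mk rec).get? "omission_mechanism" with
    | none => rfl
    | some mech =>
      by_cases hc : t.contains rv = true
      · simp only [hc, if_true, PySem.Dict.keys_modify]
        exact PySem.Dict.keys_insert_of_contains _ _ hc
      · simp [hc]

theorem ctLoopA_keys (row_field : String) (recs : List (List (String × String))) (t : PySem.Dict String (PySem.Dict String Int)) :
    (recs.foldl (ctStepA row_field) t).keys = t.keys := by
  induction recs generalizing t with
  | nil => rfl
  | cons rec rest ih => rw [List.foldl_cons, ih, ctStepA_keys]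

theorem ctStepA_of_rf_none (row_field : String) (t : PySem.Dict String (PySem.Dict String Int)) (rec : List (String × String))
    (h1 : (PySem.Dict.mk rec).get? row_field = none) : ctStepA row_field t rec = t := by
  unfold ctStepA; rw [h1]

theorem ctStepA_of_mech_none (row_field : String) (t : PySem.Dict String (PySem.Dict String Int)) (rec : List (String × String)) (rv : String)
    (h1 : (PySem.Dict.mk rec).get? row_field = some rv)
    (h2 : (PySem.Dict.mk rec).get? "omission_mechanism" = none) : ctStepA row_field t rec = t := by
  unfold ctStepA; rw [h1, h2]

theorem ctStepA_of_contains (row_field : String) (t : PySem.Dict String (PySem.Dict String Int)) (rec : List (String × String)) (rv mech : String)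
    (h1 : (PySem.Dict.mk rec).get? row_field = some rv)
    (h2 : (PySem.Dict.mk rec).get? "omission_mechanism" = some mech)
    (hc : t.contains rv = true) :
    ctStepA row_field t rec = t.modify rv PySem.Dict.empty (fun c => c.modify mech 0 (· + 1)) := by
  unfold ctStepA; rw [h1, h2]; simp [hc]

theorem ctStepA_of_not_contains (row_field : String) (t : PySem.Dict String (PySem.Dict String Int)) (rec : List (String × String)) (rv mech : String)
    (h1 : (PySem.Dict.mk rec).get? row_field = some rv)
    (h2 : (PySem.Dict.mk rec).get? "omission_mechanism" = some mech)
    (hc : t.contains rv = false) : ctStepA row_field t rec = t := by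
  unfold ctStepA; rw [h1, h2]; simp [hc]

theorem ctLoopA_getD (row_field : String) (recs : List (List (String × String))) (t : PySem.Dict String (PySem.Dict String Int)) (r : String)
    (hc : t.contains r = true) :
    (recs.foldl (ctStepA row_field) t).getD r PySem.Dict.empty
      = (ctMs recs row_field r).foldl (fun c m => c.modify m 0 (· + 1)) (t.getD r PySem.Dict.empty) := by
  induction recs generalizing t with
  | nil => rfl
  | cons rec rest ih =>
    rw [List.foldl_cons]
    cases h1 : (PySem.Dict.mk rec).get? row_field with
    | none =>
      rw [ctStepA_of_rf_none row_field t rec h1, ih t hc]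
      simp [ctMs, h1]
    | some rv =>
      cases h2 : (PySem.Dict.mk rec).get? "omission_mechanism" with
      | none =>
        rw [ctStepA_of_mech_none row_field t rec rv h1 h2, ih t hc]
        by_cases hrv : rv = r
        · simp [ctMs, h1, h2, hrv]
        · simp [ctMs, h1, hrv]
      | some mech =>
        by_cases hrv : rv = r
        · subst hrv
          rw [ctStepA_of_contains row_field t rec rv mech h1 h2 hc]
          have hc' : (t.modify rv PySem.Dict.empty (fun c => c.modify mech 0 (· + 1))).contains rv = true := by
            rw [PySem.Dict.contains_modify]; simp
          rw [ih _ hc', PySem.Dict.getD_modify_self]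
          simp [ctMs, h1, h2]
        · have hfilter : ctMs (rec :: rest) row_field r = ctMs rest row_field r := by
            simp [ctMs, h1, hrv]
          rw [hfilter]
          by_cases hcrv : t.contains rv = true
          · rw [ctStepA_of_contains row_field t rec rv mech h1 h2 hcrv]
            have hc' : (t.modify rv PySem.Dict.empty (fun c => c.modify mech 0 (· + 1))).contains r = true := by
              rw [PySem.Dict.contains_modify, hc]; simp
            rw [ih _ hc', PySem.Dict.getD_modify_of_ne _ _ _ (fun h => hrv h.symm)]
          · rw [ctStepA_of_not_contains row_field t rec rv mech h1 h2 (by simp [hcrv])]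
            exact ih t hc

theorem ctTable0_keys (row_order : List String) : (ctTable0 row_order).keys = PySem.Set.ofList row_order := by
  unfold ctTable0
  rw [PySem.Dict.keys_foldl_insert row_order (fun _ _ => PySem.Dict.empty) PySem.Dict.empty, PySem.Dict.keys_empty,
    PySem.Set.update_nil_left]

theorem ctTable0_getD (row_order : List String) (x : String) :
    (ctTable0 row_order).getD x PySem.Dict.empty = PySem.Dict.empty := by
  unfold ctTable0
  induction row_order using List.reverseRecOn with
  | nil => rfl
  | append_singleton ro r ih =>
    rw [List.foldl_append, List.foldl_cons, List.foldl_nil, PySem.Dict.getD_insert]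
    split
    · rfl
    · exact ih

theorem ctFoldB_items (g : String → PySem.Dict String Int) (row_order : List String) :
    (row_order.foldl (fun d r => d.insert r (g r)) PySem.Dict.empty).items
      = (PySem.Set.ofList row_order).map (fun r => (r, g r)) := by
  induction row_order using List.reverseRecOn with
  | nil => rfl
  | append_singleton ro r ih =>
    rw [List.foldl_append, List.foldl_cons, List.foldl_nil, PySem.Set.ofList_append_singleton]
    have hkeys : (ro.foldl (fun d r => d.insert r (g r)) PySem.Dict.empty).keys = PySem.Set.ofList ro := by
      rw [PySem.Dict.keys_foldl_insert ro (fun _ x => g x) PySem.Dict.empty, PySem.Dict.keys_empty,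
        PySem.Set.update_nil_left]
    by_cases hmem : r ∈ PySem.Set.ofList ro
    · have hc : (ro.foldl (fun d r => d.insert r (g r)) PySem.Dict.empty).contains r = true := by
        rw [PySem.Dict.contains_iff_mem_keys, hkeys]; exact hmem
      rw [PySem.Dict.items_insert_of_contains _ _ hc, ih, PySem.Set.add_of_mem hmem, List.map_map]
      refine List.map_congr_left (fun x hx => ?_)
      by_cases hxr : x = r
      · subst hxr; simp
      · simp [hxr]
    · have hc : (ro.foldl (fun d r => d.insert r (g r)) PySem.Dict.empty).contains r = false := by
        rw [← Bool.not_eq_true, PySem.Dict.contains_iff_mem_keys, hkeys]; exact hmem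
      rw [PySem.Dict.items_insert_of_not_contains _ _ hc, ih, PySem.Set.add_of_not_mem hmem]
      simp

theorem ctFinalA_getD (records : List (List (String × String))) (row_field : String) (row_order : List String)
    (r : String) (hmem : r ∈ PySem.Set.ofList row_order) :
    (records.foldl (ctStepA row_field) (ctTable0 row_order)).getD r PySem.Dict.empty
      = PySem.Dict.counter (ctMs records row_field r) := by
  have hc : (ctTable0 row_order).contains r = true := by
    rw [PySem.Dict.contains_iff_mem_keys, ctTable0_keys]; exact hmem
  rw [ctLoopA_getD row_field records _ r hc, ctTable0_getD, PySem.Dict.counter_eq_foldl]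

-- ===== VERDICT (by name: the statement is the Claim_ definition above) =====
theorem cross_tab_spec : Claim_equal_cross_tab := by
  intro records row_field row_order _ _
  unfold Spec_cross_tab
  rw [cross_tab_eq, cross_tab_alt_eq, ctFoldB_items]
  have hkeys : (records.foldl (ctStepA row_field) (ctTable0 row_order)).keys = PySem.Set.ofList row_order := by
    rw [ctLoopA_keys, ctTable0_keys]
  have hnd : (records.foldl (ctStepA row_field) (ctTable0 row_order)).keys.Nodup := by
    rw [hkeys]; exact PySem.Set.nodup_ofList row_order
  rw [PySem.Dict.items_eq_map_keys _ hnd PySem.Dict.empty, hkeys, List.map_map, List.map_map]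
  refine List.map_congr_left (fun r hr => ?_)
  simp only [Function.comp]
  rw [ctFinalA_getD records row_field row_order r hr]
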